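-- pv_equiv track=rewrite | github.com/VladislavChenakin/-5-1-12 | ChenakinLab5/ChenakinLab5_2.py | itertools_method
-- ===== SOURCE A (Python) =====
-- import itertools #набор функций для работы с итерируемыми объектами
--
-- restricted = {(1, 2), (3, 4), (7, 8)}  # Запрещенные соседние комбинации (вагоны не могут находится рядом)
--
-- def itertools_method(N, K):
--     all_perm = itertools.permutations(range(1, N+1), K)  #Создает последовательность чисел от 1 до N, Генерирует все перестановки из N элементов по K
--     permutations = [] # Вагоны не должны совпадать - permutations исключает повторения
--
--     for p in all_perm:   # Перебираем все перестановки
--         has_bad_pair = False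
--
--         # Проверяем соседние пары
--         for i in range(K-1):
--             if (p[i], p[i+1]) in restricted: # Вагоны не должны находится рядом
--                 has_bad_pair = True
--                 break  # Дальше проверять нет смысла
--
--         # Если все пары разрешены
--         if not has_bad_pair:
--             permutations.append(p)
--
--     return permutations
-- ===== SOURCE B (Python) =====
-- restricted = {(1, 2), (3, 4), (7, 8)}  # forbidden adjacent pairs
--
-- def itertools_method(N, K):
--     # Recursive backtracking: build permutations element by element, pruning
--     # forbidden adjacent pairs early instead of generating everything and filtering.
--     results = []
--
--     def backtrack(need, part, remaining):
--         if need > len(remaining):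
--             return  # not enough values left to finish; prune
--         if need == 0:
--             results.append(tuple(part))
--             return
--         for v in remaining:  # remaining is kept in ascending order -> lexicographic output
--             if part and (part[-1], v) in restricted:
--                 continue
--             backtrack(need - 1, part + [v], [x for x in remaining if x != v])
--
--     backtrack(K, [], list(range(1, N + 1)))
--     return results
-- ===== Notes on version B (the rewrite author's own statement) =====
-- stated objective: alternative
-- what changed: Replaced generate-all-K-permutations-then-filter with a recursive backtracking search that prunes a branch as soon as a forbidden adjacent pair would be formed (and when too few values remain), so invalid prefixes are never expanded.
import Mathlib
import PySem

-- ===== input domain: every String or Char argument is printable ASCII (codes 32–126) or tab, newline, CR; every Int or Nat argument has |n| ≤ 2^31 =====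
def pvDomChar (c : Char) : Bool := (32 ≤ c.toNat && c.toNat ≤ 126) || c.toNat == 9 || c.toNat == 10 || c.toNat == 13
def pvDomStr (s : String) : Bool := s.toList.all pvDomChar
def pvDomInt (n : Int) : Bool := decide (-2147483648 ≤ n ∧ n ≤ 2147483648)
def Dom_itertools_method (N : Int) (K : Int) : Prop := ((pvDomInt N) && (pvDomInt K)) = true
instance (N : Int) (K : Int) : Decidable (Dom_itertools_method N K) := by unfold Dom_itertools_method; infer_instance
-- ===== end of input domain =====

-- B replaces generate-all-permutations-then-filter by recursive backtracking that
-- prunes forbidden adjacent pairs as the permutation is built (objective: alternative algorithm).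

-- ===== PORT A =====
-- restricted = {(1, 2), (3, 4), (7, 8)} : membership test on a literal set of pairs
def pvRestricted : List (Int × Int) := [(1, 2), (3, 4), (7, 8)]

-- itertools.permutations(pool, k), ported by hand as the standard recursive
-- definition of its output sequence: for each index i (ascending), emit pool[i]
-- followed by every (k-1)-permutation of pool with index i removed.  This is exact:
-- it yields the same tuples in the same (index-lexicographic) order.
def pvPermsA (k : Nat) (pool : List Int) : List (List Int) :=
  if pool.length < k then []  -- itertools' own 'if r > n: return' shortcut
  else
    match k with
    | 0 => [[]]
    | Nat.succ k' =>
        (List.range pool.length).flatMap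
          (fun i => (pvPermsA k' (pool.eraseIdx i)).map (fun q => pool.getD i 0 :: q))

-- the inner 'for i in range(K-1): if (p[i], p[i+1]) in restricted: break' loop,
-- walking the adjacent pairs of p and stopping at the first restricted one
def pvHasBad : List Int → Bool
  | a :: b :: rest => if pvRestricted.contains (a, b) then true else pvHasBad (b :: rest)
  | _ => false

def itertools_method (N : Int) (K : Int) : List (List Int) :=
  if K < 0 then []  -- itertools.permutations raises ValueError here (outside Pre_)
  else (pvPermsA K.toNat (PySem.List.pyRange 1 (N + 1) 1)).filter (fun p => !pvHasBad p)

-- ===== PORT B =====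
-- 'part and (part[-1], v) in restricted' as a predicate on the last element of part
def pvStepOkP (prev : Option Int) (v : Int) : Bool :=
  match prev with
  | some a => !pvRestricted.contains (a, v)
  | none => true

-- backtrack(need, part, remaining) from Source B
def pvBT (need : Nat) (part : List Int) (rem : List Int) : List (List Int) :=
  if rem.length < need then []  -- 'if need > len(remaining): return' prune
  else match need with
  | 0 => [part]
  | Nat.succ n =>
      rem.foldl (fun acc v =>
        if pvStepOkP part.getLast? v then
          acc ++ pvBT n (part ++ [v]) (rem.filter (fun x => x ≠ v))
        else acc) []

def itertools_method_alt (N : Int) (K : Int) : List (List Int) :=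
  if K < 0 then []  -- backtrack's 'need == 0' never fires for negative K
  else pvBT K.toNat [] (PySem.List.pyRange 1 (N + 1) 1)

-- ===== PRECONDITION & SPEC =====
-- Pre_ excludes K < 0, where itertools.permutations raises ValueError.
def Pre_itertools_method (N : Int) (K : Int) : Prop := 0 ≤ K
instance (N : Int) (K : Int) : Decidable (Pre_itertools_method N K) := by
  unfold Pre_itertools_method; infer_instance
def pvWitness_itertools_method : Int × Int := (3, 2)


def Spec_itertools_method (N : Int) (K : Int) (out : List (List Int)) : Prop :=
  out = itertools_method_alt N K
instance (N : Int) (K : Int) (out : List (List Int)) : Decidable (Spec_itertools_method N K out) := by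
  unfold Spec_itertools_method; infer_instance

-- ===== CLAIM (what is proved, stated in full; the proofs are below) =====
def Claim_equal_itertools_method : Prop := ∀ (N : Int) (K : Int), Dom_itertools_method N K → Pre_itertools_method N K → Spec_itertools_method N K (itertools_method N K)

-- ===== LEMMAS AND PROOFS =====

-- 'no bad adjacent pair in prev?, q' as a chain predicate (proof-side characterisation)
def pvChainOk (prev : Option Int) : List Int → Bool
  | [] => true
  | v :: rest => pvStepOkP prev v && pvChainOk (some v) rest

theorem pvChainOk_some_eq (q : List Int) : ∀ a, pvChainOk (some a) q = !pvHasBad (a :: q) := by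
  induction q with
  | nil => intro a; simp [pvChainOk, pvHasBad]
  | cons v r ih =>
      intro a
      by_cases h : pvRestricted.contains (a, v) = true <;>
        simp [pvChainOk, pvHasBad, pvStepOkP, h, ih v]

theorem pvChainOk_none_eq (q : List Int) : pvChainOk none q = !pvHasBad q := by
  cases q with
  | nil => simp [pvChainOk, pvHasBad]
  | cons v r => simp [pvChainOk, pvStepOkP, pvChainOk_some_eq r v]

theorem pvFoldl_if_append {β : Type} (c : Int → Bool) (f : Int → List β) (l : List Int) :
    ∀ init : List β,
      l.foldl (fun acc v => if c v then acc ++ f v else acc) init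
        = init ++ l.flatMap (fun v => if c v then f v else []) := by
  induction l with
  | nil => intro init; simp
  | cons v r ih =>
      intro init
      by_cases h : c v = true <;> simp [List.foldl_cons, h, ih, List.flatMap_cons]

theorem pvMap_range_getD (l : List Int) :
    (List.range l.length).map (fun i => l.getD i 0) = l := by
  apply List.ext_getElem
  · simp
  · intro j h1 h2
    simp [List.getD_eq_getElem?_getD, List.getElem?_eq_getElem h2]

theorem pvEraseIdx_eq_filter (l : List Int) (i : Nat) (h : i < l.length) (hn : l.Nodup) :
    l.eraseIdx i = l.filter (fun x => x ≠ l[i]) := by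
  rw [← List.Nodup.erase_getElem hn i h, List.Nodup.erase_eq_filter hn]
  congr 1
  funext x
  by_cases hx : x = l[i] <;> simp [hx]

-- main invariant: backtracking from 'part' over a duplicate-free pool equals
-- A's generate-then-filter restricted to extensions of 'part'
theorem pvBT_eq (n : Nat) : ∀ (part rem : List Int), rem.Nodup →
    pvBT n part rem
      = ((pvPermsA n rem).filter (pvChainOk part.getLast?)).map (fun q => part ++ q) := by
  induction n with
  | zero => intro part rem _; simp [pvBT, pvPermsA, pvChainOk]
  | succ n ih =>
      intro part rem hn
      by_cases hlen : rem.length < n + 1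
      case pos =>
        rw [show pvBT (n + 1) part rem = [] from by
              conv_lhs => rw [pvBT.eq_def, if_pos hlen]]
        rw [show pvPermsA (n + 1) rem = [] from by
              conv_lhs => rw [pvPermsA.eq_def, if_pos hlen]]
        simp
      case neg =>
      rw [show pvBT (n + 1) part rem
            = rem.foldl (fun acc v =>
                if pvStepOkP part.getLast? v then
                  acc ++ pvBT n (part ++ [v]) (rem.filter (fun x => x ≠ v))
                else acc) [] from by
            conv_lhs => rw [pvBT.eq_def, if_neg hlen],
          pvFoldl_if_append, List.nil_append]
      rw [show pvPermsA (n + 1) rem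
            = (List.range rem.length).flatMap
                (fun i => (pvPermsA n (rem.eraseIdx i)).map (fun q => rem.getD i 0 :: q))
            from by conv_lhs => rw [pvPermsA.eq_def, if_neg hlen]]
      rw [List.filter_flatMap, List.map_flatMap]
      have key : ∀ i ∈ List.range rem.length,
          ((List.filter (pvChainOk part.getLast?)
              ((pvPermsA n (rem.eraseIdx i)).map (fun q => rem.getD i 0 :: q))).map
            (fun q => part ++ q))
          = (fun v => if pvStepOkP part.getLast? v
                then pvBT n (part ++ [v]) (rem.filter (fun x => x ≠ v)) else [])
              (rem.getD i 0) := by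
        intro i hi
        have hi' : i < rem.length := List.mem_range.mp hi
        have hgd : rem.getD i 0 = rem[i] := by
          simp [List.getD_eq_getElem?_getD, List.getElem?_eq_getElem hi']
        have hrw : rem.eraseIdx i = rem.filter (fun x => x ≠ rem.getD i 0) := by
          rw [hgd]; exact pvEraseIdx_eq_filter rem i hi' hn
        rw [List.filter_map]
        obtain ⟨v, hv⟩ : ∃ v, rem.getD i 0 = v := ⟨_, rfl⟩
        rw [hv] at hrw ⊢
        by_cases hstep : pvStepOkP part.getLast? v = true
        · rw [show ((fun w => if pvStepOkP part.getLast? w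
                then pvBT n (part ++ [w]) (rem.filter (fun x => x ≠ w)) else []) v)
              = pvBT n (part ++ [v]) (rem.filter (fun x => x ≠ v))
              from by simp only [hstep, if_true]]
          rw [ih (part ++ [v]) (rem.filter (fun x => x ≠ v)) (hn.filter _), ← hrw]
          have hf : (pvChainOk part.getLast? ∘ fun q => v :: q)
              = pvChainOk (some v) := by
            funext q; simp [Function.comp, pvChainOk, hstep]
          have hlast : (part ++ [v]).getLast? = some v := by
            simp [List.getLast?_append]
          rw [hf, hlast, List.map_map]
          apply List.map_congr_left
          intro q _
          simp only [Function.comp]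
          exact List.append_cons part v q
        · have hf : (pvChainOk part.getLast? ∘ fun q => v :: q)
              = (fun _ => false) := by
            funext q; simp [Function.comp, pvChainOk, hstep]
          rw [hf]
          simp only [List.filter_false, List.map_nil]
          exact (if_neg hstep).symm
      rw [List.flatMap_congr key]
      rw [← List.flatMap_map (fun i => rem.getD i 0)
            (fun v => if pvStepOkP part.getLast? v
                then pvBT n (part ++ [v]) (rem.filter (fun x => x ≠ v)) else [])
            (List.range rem.length)]
      rw [pvMap_range_getD]

-- ===== VERDICT (by name: the statement is the Claim_ definition above) =====
theorem itertools_method_spec : Claim_equal_itertools_method := by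
  intro N K _ hpre
  unfold Spec_itertools_method itertools_method itertools_method_alt
  have hK : ¬ K < 0 := not_lt.mpr hpre
  rw [if_neg hK, if_neg hK]
  rw [pvBT_eq K.toNat [] (PySem.List.pyRange 1 (N + 1) 1)
        (PySem.List.nodup_pyRange_one 1 (N + 1))]
  rw [show ([] : List Int).getLast? = none from rfl]
  rw [List.map_id'' ?_]
  · apply List.filter_congr
    intro q _
    rw [pvChainOk_none_eq]
  · intro q; simp
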